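-- pv_equiv track=rewrite | github.com/Guled/adventOfCode2024 | day_2/day_2.py | validate_list
-- ===== SOURCE A (Python) =====
-- def validate_list(lst):
--
--     count_safe_reports = 0
--     for line in lst:
--         line = line.split(' ')
--         line = list(filter(lambda x: x != '', line))
--         state = "unknown"
--         safe = True
--
--         for report_index in range(len(line)):
--             if len(line) == 0 or len(line) == 1 or report_index == len(line) - 1:
--                 continue
--             else:
--                 if state == "unknown":
--                     difference = int(line[report_index]) - int(line[report_index + 1])
--                     if difference > 0:
--                         state = "increasing"
--                     elif difference < 0:
--                         state = "decreasing"
--                     if abs(difference) < 1 or abs(difference) > 3: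
--                             safe = False
--                 else:
--                     difference = int(line[report_index]) - int(line[report_index + 1])
--                     if difference > 0 and state == "decreasing":
--                         safe = False
--                     elif difference < 0 and state == "increasing":
--                         safe = False
--                     if abs(difference) < 1 or abs(difference) > 3:
--                         safe = False
--
--         if safe:
--             count_safe_reports += 1
--
--     return count_safe_reports
-- ===== SOURCE B (Python) =====
-- def _safe(line):
--     toks = [t for t in line.split(' ') if t != '']
--     if len(toks) <= 1:
--         return True
--     nums = [int(t) for t in toks]
--     diffs = [a - b for a, b in zip(nums, nums[1:])]
--     return (all(1 <= abs(d) <= 3 for d in diffs)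
--             and (all(d > 0 for d in diffs) or all(d < 0 for d in diffs)))
--
--
-- def validate_list(lst):
--     return sum(1 for line in lst if _safe(line))
-- ===== Notes on version B (the rewrite author's own statement) =====
-- stated objective: simpler
-- what changed: Replaces A's index loop with a running state string and mutable safe flag by a per-line helper that builds the adjacent-difference list once and reduces it with all() predicates (bounds check plus all-positive-or-all-negative), summed by a generator expression.
import Mathlib
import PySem

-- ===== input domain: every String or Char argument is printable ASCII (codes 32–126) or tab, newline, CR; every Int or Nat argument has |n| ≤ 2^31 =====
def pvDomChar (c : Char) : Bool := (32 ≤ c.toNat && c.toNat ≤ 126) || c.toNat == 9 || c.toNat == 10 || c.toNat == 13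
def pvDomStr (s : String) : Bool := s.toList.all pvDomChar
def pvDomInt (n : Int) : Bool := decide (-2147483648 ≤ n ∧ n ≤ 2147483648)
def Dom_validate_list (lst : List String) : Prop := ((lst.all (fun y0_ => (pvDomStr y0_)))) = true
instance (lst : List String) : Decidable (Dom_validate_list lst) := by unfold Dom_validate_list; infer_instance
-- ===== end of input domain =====

-- B replaces A's index loop with its running state/safe flags by a per-line
-- adjacent-difference list reduced with `all` predicates, summed by a count (objective: simpler).


-- shared tokenizer: line.split(' ') then filter out '' — identical code in both Pythons
def pvToks (line : String) : List String :=
  ((PySem.Str.split? line " ").getD []).filter (fun x => x ≠ "")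

-- int(t); under Pre_ the token always parses, the default is never the value used
def pvConv (t : String) : Int := (PySem.Int.ofStr? t).getD 0

-- ===== PORT A =====
-- body of A's inner loop over report_index (indices of range(len(toks)) are in range,
-- so toks[i] is ported as toks.getD i "" — exact for 0 ≤ i < len)
def pvAStep (toks : List String) (st : String × Bool) (report_index : Nat) : String × Bool :=
  let n := toks.length
  if n == 0 || n == 1 || report_index == n - 1 then st
  else
    let difference := pvConv (toks.getD report_index "") - pvConv (toks.getD (report_index + 1) "")
    if st.1 == "unknown" then
      let state := if difference > 0 then "increasing"
                   else if difference < 0 then "decreasing" else st.1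
      let safe := if |difference| < 1 ∨ |difference| > 3 then false else st.2
      (state, safe)
    else
      let safe := if decide (difference > 0) && (st.1 == "decreasing") then false
                  else if decide (difference < 0) && (st.1 == "increasing") then false
                  else st.2
      let safe := if |difference| < 1 ∨ |difference| > 3 then false else safe
      (st.1, safe)

def validate_list (lst : List String) : Int :=
  lst.foldl (fun count_safe_reports line =>
    let toks := pvToks line
    let res := (List.range toks.length).foldl (pvAStep toks) ("unknown", true)
    if res.2 then count_safe_reports + 1 else count_safe_reports) 0

-- ===== PORT B =====
def pvSafe (line : String) : Bool :=
  let toks := pvToks line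
  if toks.length ≤ 1 then true
  else
    let nums := toks.map pvConv
    let diffs := (nums.zip nums.tail).map (fun p => p.1 - p.2)
    (diffs.all fun d => decide (1 ≤ |d| ∧ |d| ≤ 3)) &&
      ((diffs.all fun d => decide (0 < d)) || (diffs.all fun d => decide (d < 0)))

def validate_list_alt (lst : List String) : Int :=
  ((lst.countP pvSafe : Nat) : Int)

-- ===== PRECONDITION & SPEC =====
-- Pre_ excludes exactly the inputs on which Python A raises ValueError: a line whose
-- filtered token list has ≥ 2 tokens, one of which is not int()-parseable.
def Pre_validate_list (lst : List String) : Prop :=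
  ∀ line ∈ lst, (pvToks line).length ≤ 1 ∨
    ∀ t ∈ pvToks line, (PySem.Int.ofStr? t).isSome = true
instance (lst : List String) : Decidable (Pre_validate_list lst) := by
  unfold Pre_validate_list; infer_instance
def pvWitness_validate_list : List String := ["1 2 3", "9  7", "", "x", "-1 -4"]

def Spec_validate_list (lst : List String) (out : Int) : Prop := out = validate_list_alt lst
instance (lst : List String) (out : Int) : Decidable (Spec_validate_list lst out) := by
  unfold Spec_validate_list; infer_instance

-- ===== CLAIM (what is proved, stated in full; the proofs are below) =====
def Claim_equal_validate_list : Prop :=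
  ∀ (lst : List String), Dom_validate_list lst → Pre_validate_list lst →
    Spec_validate_list lst (validate_list lst)

-- ===== LEMMAS AND PROOFS =====

-- the state machine step on a difference value (proof-side abbreviation of pvAStep's else branch)
def pvSStep (st : String × Bool) (d : Int) : String × Bool :=
  if st.1 == "unknown" then
    let state := if d > 0 then "increasing" else if d < 0 then "decreasing" else st.1
    let safe := if |d| < 1 ∨ |d| > 3 then false else st.2
    (state, safe)
  else
    let safe := if decide (d > 0) && (st.1 == "decreasing") then false
                else if decide (d < 0) && (st.1 == "increasing") then false
                else st.2
    let safe := if |d| < 1 ∨ |d| > 3 then false else safe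
    (st.1, safe)

theorem pvAStep_eq (toks : List String) (st : String × Bool) (i : Nat) :
    pvAStep toks st i =
      if toks.length == 0 || toks.length == 1 || i == toks.length - 1 then st
      else pvSStep st (pvConv (toks.getD i "") - pvConv (toks.getD (i + 1) "")) := by
  rfl

theorem pvSStep_false (ds : List Int) (s : String) :
    (ds.foldl pvSStep (s, false)).2 = false := by
  induction ds generalizing s with
  | nil => rfl
  | cons d t ih =>
      simp only [List.foldl_cons, pvSStep]
      split_ifs <;> simp_all

theorem step_inc (b : Bool) (d : Int) :
    pvSStep ("increasing", b) d = ("increasing", decide (0 < d) && decide (1 ≤ |d| ∧ |d| ≤ 3) && b) := by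
  simp only [pvSStep]
  rw [if_neg (by decide)]
  simp only [Prod.mk.injEq, true_and]
  have h0 : (0:Int) ≤ |d| := abs_nonneg d
  rcases abs_choice d with h' | h' <;> rw [h'] at * <;> split_ifs <;> simp_all <;> omega

theorem step_dec (b : Bool) (d : Int) :
    pvSStep ("decreasing", b) d = ("decreasing", decide (d < 0) && decide (1 ≤ |d| ∧ |d| ≤ 3) && b) := by
  simp only [pvSStep]
  rw [if_neg (by decide)]
  simp only [Prod.mk.injEq, true_and]
  have h0 : (0:Int) ≤ |d| := abs_nonneg d
  rcases abs_choice d with h' | h' <;> rw [h'] at * <;> split_ifs <;> simp_all <;> omega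

theorem all_and_split (t : List Int) (p q : Int → Bool) :
    (t.all fun x => p x && q x) = (t.all p && t.all q) := by
  induction t with
  | nil => rfl
  | cons x r ih =>
      simp only [List.all_cons, ih]
      cases p x <;> cases q x <;> cases r.all p <;> cases r.all q <;> rfl

theorem pvSStep_inc (ds : List Int) (b : Bool) :
    (ds.foldl pvSStep ("increasing", b)).2 =
      (b && ds.all fun d => decide (0 < d) && decide (1 ≤ |d| ∧ |d| ≤ 3)) := by
  induction ds generalizing b with
  | nil => simp
  | cons d t ih =>
      rw [List.foldl_cons, step_inc, ih, List.all_cons]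
      cases b <;> cases h1 : decide (0 < d) <;> cases h2 : decide (1 ≤ |d| ∧ |d| ≤ 3) <;> simp

theorem pvSStep_dec (ds : List Int) (b : Bool) :
    (ds.foldl pvSStep ("decreasing", b)).2 =
      (b && ds.all fun d => decide (d < 0) && decide (1 ≤ |d| ∧ |d| ≤ 3)) := by
  induction ds generalizing b with
  | nil => simp
  | cons d t ih =>
      rw [List.foldl_cons, step_dec, ih, List.all_cons]
      cases b <;> cases h1 : decide (d < 0) <;> cases h2 : decide (1 ≤ |d| ∧ |d| ≤ 3) <;> simp

theorem pvSStep_main (ds : List Int) :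
    (ds.foldl pvSStep ("unknown", true)).2 =
      ((ds.all fun d => decide (1 ≤ |d| ∧ |d| ≤ 3)) &&
       ((ds.all fun d => decide (0 < d)) || (ds.all fun d => decide (d < 0)))) := by
  cases ds with
  | nil => simp
  | cons d t =>
      rw [List.foldl_cons]
      rcases lt_trichotomy d 0 with h | h | h
      · have hstep : pvSStep ("unknown", true) d = ("decreasing", decide (1 ≤ |d| ∧ |d| ≤ 3)) := by
          simp only [pvSStep]
          rw [if_pos (by decide)]
          have h0 : (0:Int) ≤ |d| := abs_nonneg d
          rcases abs_choice d with h' | h' <;> rw [h'] at * <;> split_ifs <;> simp_all <;> omega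
        rw [hstep, pvSStep_dec]
        simp only [List.all_cons, all_and_split]
        have h1 : decide (d < 0) = true := by simp [h]
        have h2 : decide (0 < d) = false := by simp; omega
        rw [h1, h2]
        cases decide (1 ≤ |d| ∧ |d| ≤ 3) <;>
          cases t.all fun x => decide (1 ≤ |x| ∧ |x| ≤ 3) <;>
            cases t.all fun x => decide (x < 0) <;>
              cases t.all fun x => decide (0 < x) <;> rfl
      · subst h
        have hstep : pvSStep ("unknown", true) 0 = ("unknown", false) := by decide
        rw [hstep, pvSStep_false]
        simp
      · have hstep : pvSStep ("unknown", true) d = ("increasing", decide (1 ≤ |d| ∧ |d| ≤ 3)) := by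
          simp only [pvSStep]
          rw [if_pos (by decide)]
          have h0 : (0:Int) ≤ |d| := abs_nonneg d
          rcases abs_choice d with h' | h' <;> rw [h'] at * <;> split_ifs <;> simp_all <;> omega
        rw [hstep, pvSStep_inc]
        simp only [List.all_cons, all_and_split]
        have h1 : decide (0 < d) = true := by simp [h]
        have h2 : decide (d < 0) = false := by simp; omega
        rw [h1, h2]
        cases decide (1 ≤ |d| ∧ |d| ≤ 3) <;>
          cases t.all fun x => decide (1 ≤ |x| ∧ |x| ≤ 3) <;>
            cases t.all fun x => decide (x < 0) <;>
              cases t.all fun x => decide (0 < x) <;> rfl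

-- getD through map pvConv (defaults agree since pvConv "" = 0)
theorem pvConv_empty : pvConv "" = 0 := by decide

theorem getD_map_pvConv (l : List String) (i : Nat) :
    (l.map pvConv).getD i 0 = pvConv (l.getD i "") := by
  induction l generalizing i with
  | nil => simp [pvConv_empty]
  | cons x t ih =>
      cases i with
      | zero => simp
      | succ n => simpa using ih n

-- index fold over range (len-1) equals fold over adjacent differences
theorem foldl_congr_all {α β : Type} (l : List α) (f g : β → α → β) (s : β)
    (h : ∀ a ∈ l, ∀ st, f st a = g st a) : l.foldl f s = l.foldl g s := by
  induction l generalizing s with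
  | nil => rfl
  | cons x t ih =>
      rw [List.foldl_cons, List.foldl_cons, h x (by simp)]
      exact ih _ (fun a ha st => h a (List.mem_cons_of_mem _ ha) st)

theorem foldl_range_diffs {β : Type} (f : β → Int → β) (xs : List Int)
    (s : β) :
    (List.range (xs.length - 1)).foldl (fun st i => f st (xs.getD i 0 - xs.getD (i + 1) 0)) s
      = ((xs.zip xs.tail).map (fun p => p.1 - p.2)).foldl f s := by
  induction xs generalizing s with
  | nil => simp
  | cons x t ih =>
      cases t with
      | nil => simp
      | cons y r =>
          have hm : (x :: y :: r).length - 1 = (y :: r).length - 1 + 1 := by simp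
          rw [hm, List.range_succ_eq_map, List.foldl_cons, List.foldl_map]
          simp only [List.getD_cons_succ, List.getD_cons_zero] at ih ⊢
          rw [ih]
          simp

-- A's guarded range(len) loop = the unguarded range(len-1) loop, for len ≥ 2
theorem foldl_range_guard (toks : List String) (h : 2 ≤ toks.length) (s : String × Bool) :
    (List.range toks.length).foldl (pvAStep toks) s
      = (List.range (toks.length - 1)).foldl
          (fun st i => pvSStep st (pvConv (toks.getD i "") - pvConv (toks.getD (i + 1) ""))) s := by
  obtain ⟨m, hm⟩ : ∃ m, toks.length = m + 1 := ⟨toks.length - 1, by omega⟩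
  rw [hm, List.range_succ, List.foldl_append]
  have hlast : ∀ st, (pvAStep toks) st m = st := by
    intro st
    rw [pvAStep_eq]
    have : (toks.length == 0 || toks.length == 1 || m == toks.length - 1) = true := by
      simp [hm]
    rw [this, if_pos rfl]
  rw [List.foldl_cons, List.foldl_nil, hlast]
  have hcongr : ∀ i ∈ List.range m, ∀ st,
      (pvAStep toks) st i = pvSStep st (pvConv (toks.getD i "") - pvConv (toks.getD (i + 1) "")) := by
    intro i hi st
    rw [pvAStep_eq]
    have hg : (toks.length == 0 || toks.length == 1 || i == toks.length - 1) = false := by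
      simp only [List.mem_range] at hi
      simp [hm]
      omega
    rw [hg, if_neg (by simp)]
  rw [foldl_congr_all _ _ _ _ hcongr]
  simp

-- per line: A's inner loop verdict = pvSafe
theorem line_eq (line : String) :
    ((List.range (pvToks line).length).foldl (pvAStep (pvToks line)) ("unknown", true)).2
      = pvSafe line := by
  by_cases h : (pvToks line).length ≤ 1
  · have hres : ((List.range (pvToks line).length).foldl (pvAStep (pvToks line)) ("unknown", true)).2 = true := by
      interval_cases hl : (pvToks line).length
      · rfl
      · have : List.range 1 = [0] := rfl
        rw [this, List.foldl_cons, List.foldl_nil, pvAStep_eq]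
        rw [if_pos (by simp [hl])]
    rw [hres]
    unfold pvSafe
    rw [if_pos h]
  · have h2 : 2 ≤ (pvToks line).length := by omega
    rw [foldl_range_guard _ h2]
    have hbody : ∀ (s : String × Bool),
        (List.range ((pvToks line).length - 1)).foldl
          (fun st i => pvSStep st (pvConv ((pvToks line).getD i "") - pvConv ((pvToks line).getD (i + 1) ""))) s
        = (List.range (((pvToks line).map pvConv).length - 1)).foldl
          (fun st i => pvSStep st (((pvToks line).map pvConv).getD i 0 - ((pvToks line).map pvConv).getD (i + 1) 0)) s := by
      intro s
      rw [List.length_map]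
      exact (foldl_congr_all _ _ _ _ (by
        intro i hi st
        rw [getD_map_pvConv, getD_map_pvConv])).symm
    rw [hbody, foldl_range_diffs, pvSStep_main]
    unfold pvSafe
    rw [if_neg (by omega)]

theorem count_eq (lst : List String) (c : Int) :
    lst.foldl (fun count_safe_reports line =>
      let toks := pvToks line
      let res := (List.range toks.length).foldl (pvAStep toks) ("unknown", true)
      if res.2 then count_safe_reports + 1 else count_safe_reports) c
      = c + lst.countP pvSafe := by
  induction lst generalizing c with
  | nil => simp
  | cons x t ih =>
      simp only [List.foldl_cons]
      rw [ih]
      cases hp : pvSafe x <;> simp [line_eq x, hp] <;> omega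

-- ===== VERDICT (by name: the statement is the Claim_ definition above) =====
theorem validate_list_spec : Claim_equal_validate_list := by
  intro lst _ _
  unfold Spec_validate_list validate_list validate_list_alt
  rw [count_eq]
  simp
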